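-- pv_equiv track=rewrite | github.com/occ010/aoc2019 | day3/part2.py | calculate_wire_distance
-- ===== SOURCE A (Python) =====
-- def calculate_wire_distance(p, wire):
--     ''' Calculates the number of steps needed to get to given point (p) for given wire '''
--
--     distance = 0
--     for i in range(len(wire) - 1):
--         # Check if point p lies on current length of wire
--         if (point_on_segment(p, wire[i], wire[i + 1])):
--             distance += int(abs(wire[i][0] - p[0]) + abs(wire[i][1] - p[1]))
--             return distance
--         else:
--             distance += int(abs(wire[i][0] - wire[i + 1][0]) + abs(wire[i][1] - wire[i + 1][1]))
--
--     return distance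
--
-- def point_on_segment(x, p, r):
--     ''' Checks if point x lies on line segment 'pr'.'''
--
--     if (x[0] != p[0] and x[1] != p[1]):
--         # point x shares neither x nor y coordinates, hence it isn't on the current segment
--         return False
--
--     if (x[0] <= max(p[0], r[0])
--         and x[0] >= min(p[0], r[0])
--         and x[1] <= max(p[1], r[1])
--         and x[1] >= min(p[1], r[1])
--         ):
--         return True
--     else:
--         return False
-- ===== SOURCE B (Python) =====
-- def calculate_wire_distance(p, wire):
--     ''' Steps along the wire to reach point p: prefix sums of segment lengths,
--         then a separate scan for the first segment containing p. '''
--     segs = list(zip(wire, wire[1:]))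
--     prefix = [0]
--     for a, b in segs:
--         prefix.append(prefix[-1] + int(abs(a[0] - b[0]) + abs(a[1] - b[1])))
--     for steps, (a, b) in zip(prefix, segs):
--         if point_on_segment(p, a, b):
--             return steps + int(abs(a[0] - p[0]) + abs(a[1] - p[1]))
--     return prefix[-1]
--
-- def point_on_segment(x, p, r):
--     ''' Checks if point x lies on line segment 'pr'.'''
--     if (x[0] != p[0] and x[1] != p[1]):
--         return False
--     if (x[0] <= max(p[0], r[0])
--         and x[0] >= min(p[0], r[0])
--         and x[1] <= max(p[1], r[1])
--         and x[1] >= min(p[1], r[1])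
--         ):
--         return True
--     else:
--         return False
-- ===== Notes on version B (the rewrite author's own statement) =====
-- stated objective: alternative
-- what changed: B decomposes the task into two separate passes: it first builds a prefix list of cumulative segment lengths, then scans prefix/segment pairs for the first segment containing p, instead of A's single loop that interleaves accumulation with the containment test and early return.
import Mathlib
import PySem

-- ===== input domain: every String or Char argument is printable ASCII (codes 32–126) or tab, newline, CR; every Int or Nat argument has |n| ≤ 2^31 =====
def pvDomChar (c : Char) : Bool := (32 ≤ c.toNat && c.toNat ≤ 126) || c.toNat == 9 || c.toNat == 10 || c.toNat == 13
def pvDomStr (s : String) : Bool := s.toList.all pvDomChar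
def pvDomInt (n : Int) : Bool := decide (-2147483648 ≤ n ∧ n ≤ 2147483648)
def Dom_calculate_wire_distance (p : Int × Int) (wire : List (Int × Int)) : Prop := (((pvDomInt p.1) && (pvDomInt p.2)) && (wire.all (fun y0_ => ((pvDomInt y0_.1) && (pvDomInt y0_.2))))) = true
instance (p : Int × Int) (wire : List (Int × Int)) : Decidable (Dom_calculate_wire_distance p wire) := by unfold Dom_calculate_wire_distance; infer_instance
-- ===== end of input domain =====

-- B is an alternative decomposition of A: two separate passes (a prefix list of cumulative
-- segment lengths, then a scan for the first segment containing p) instead of A's single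
-- loop interleaving accumulation with the containment test; same containment test.

-- ===== PORT A =====
-- helper shared by both Pythons: point_on_segment, transliterated
def point_on_segment (x p r : Int × Int) : Bool :=
  if x.1 ≠ p.1 ∧ x.2 ≠ p.2 then false
  else if x.1 ≤ max p.1 r.1 ∧ min p.1 r.1 ≤ x.1 ∧ x.2 ≤ max p.2 r.2 ∧ min p.2 r.2 ≤ x.2 then
    true
  else false

-- A's loop over i in range(len(wire)-1), reading wire[i], wire[i+1]: structural recursion
-- over the list of consecutive pairs with the 'distance' accumulator and early return.
def aLoop (p : Int × Int) (segs : List ((Int × Int) × (Int × Int))) (distance : Int) : Int :=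
  match segs with
  | [] => distance
  | (a, b) :: rest =>
    if point_on_segment p a b then distance + (|a.1 - p.1| + |a.2 - p.2|)
    else aLoop p rest (distance + (|a.1 - b.1| + |a.2 - b.2|))

def calculate_wire_distance (p : Int × Int) (wire : List (Int × Int)) : Int :=
  aLoop p (wire.zip wire.tail) 0

-- ===== PORT B =====
-- Source B's first loop: prefix.append(prefix[-1] + segment length)
def bStep (acc : List Int) (s : (Int × Int) × (Int × Int)) : List Int :=
  acc ++ [acc.getLastD 0 + (|s.1.1 - s.2.1| + |s.1.2 - s.2.2|)]

-- Source B's second loop: first (steps, (a, b)) in zip(prefix, segs) containing p, else prefix[-1]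
def bFind (p : Int × Int) (pre : List Int) (segs : List ((Int × Int) × (Int × Int))) : Int :=
  match (pre.zip segs).find? (fun q => point_on_segment p q.2.1 q.2.2) with
  | some q => q.1 + (|q.2.1.1 - p.1| + |q.2.1.2 - p.2|)
  | none => pre.getLastD 0

def calculate_wire_distance_alt (p : Int × Int) (wire : List (Int × Int)) : Int :=
  let segs := wire.zip wire.tail
  bFind p (segs.foldl bStep [0]) segs

-- ===== PRECONDITION & SPEC =====
def Spec_calculate_wire_distance (p : Int × Int) (wire : List (Int × Int)) (out : Int) : Prop := out = calculate_wire_distance_alt p wire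
instance (p : Int × Int) (wire : List (Int × Int)) (out : Int) : Decidable (Spec_calculate_wire_distance p wire out) := by unfold Spec_calculate_wire_distance; infer_instance

-- ===== CLAIM (what is proved, stated in full; the proofs are below) =====
def Claim_equal_calculate_wire_distance : Prop := ∀ (p : Int × Int) (wire : List (Int × Int)), Dom_calculate_wire_distance p wire → Spec_calculate_wire_distance p wire (calculate_wire_distance p wire)

-- ===== LEMMAS AND PROOFS =====

-- reference value: total steps to p along the segment list
def refF (p : Int × Int) : List ((Int × Int) × (Int × Int)) → Int
  | [] => 0
  | (a, b) :: rest =>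
    if point_on_segment p a b then |a.1 - p.1| + |a.2 - p.2|
    else (|a.1 - b.1| + |a.2 - b.2|) + refF p rest

lemma aLoop_eq (p : Int × Int) (segs : List ((Int × Int) × (Int × Int))) (d : Int) :
    aLoop p segs d = d + refF p segs := by
  induction segs generalizing d with
  | nil => simp [aLoop, refF]
  | cons s rest ih =>
    obtain ⟨a, b⟩ := s
    simp only [aLoop, refF]
    split_ifs with h
    · ring
    · rw [ih]; ring

lemma bFold_shift (segs : List ((Int × Int) × (Int × Int))) (acc : List Int) (c : Int) :
    segs.foldl bStep (acc ++ [c]) = acc ++ segs.foldl bStep [c] := by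
  induction segs generalizing acc c with
  | nil => simp
  | cons s rest ih =>
    simp only [List.foldl_cons]
    have h1 : bStep (acc ++ [c]) s = (acc ++ [c]) ++ [c + (|s.1.1 - s.2.1| + |s.1.2 - s.2.2|)] := by
      simp [bStep]
    have h2 : bStep [c] s = [c] ++ [c + (|s.1.1 - s.2.1| + |s.1.2 - s.2.2|)] := by
      simp [bStep]
    rw [h1, h2, ih, ih [c], List.append_assoc]

lemma bFold_cons (s : (Int × Int) × (Int × Int)) (rest : List ((Int × Int) × (Int × Int))) (c : Int) :
    (s :: rest).foldl bStep [c] = c :: rest.foldl bStep [c + (|s.1.1 - s.2.1| + |s.1.2 - s.2.2|)] := by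
  have h : bStep [c] s = [c] ++ [c + (|s.1.1 - s.2.1| + |s.1.2 - s.2.2|)] := by simp [bStep]
  simp only [List.foldl_cons, h]
  rw [bFold_shift]
  rfl

lemma bFold_ne_nil (segs : List ((Int × Int) × (Int × Int))) (c : Int) :
    segs.foldl bStep [c] ≠ [] := by
  cases segs with
  | nil => simp
  | cons s rest => rw [bFold_cons]; simp

lemma bFind_eq (p : Int × Int) (segs : List ((Int × Int) × (Int × Int))) (c : Int) :
    bFind p (segs.foldl bStep [c]) segs = c + refF p segs := by
  induction segs generalizing c with
  | nil => simp [bFind, refF]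
  | cons s rest ih =>
    obtain ⟨a, b⟩ := s
    rw [bFold_cons]
    simp only [bFind, refF, List.zip_cons_cons, List.find?_cons]
    by_cases h : point_on_segment p a b
    · simp [h]
    · simp only [h, Bool.false_eq_true, reduceIte]
      have hne := bFold_ne_nil rest (c + (|a.1 - b.1| + |a.2 - b.2|))
      have := ih (c + (|a.1 - b.1| + |a.2 - b.2|))
      simp only [bFind] at this
      cases hfind : (((rest.foldl bStep [c + (|a.1 - b.1| + |a.2 - b.2|)]).zip rest).find?
          (fun q => point_on_segment p q.2.1 q.2.2)) with
      | some q =>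
        rw [hfind] at this
        rw [this]; ring
      | none =>
        rw [hfind] at this
        rw [List.getLastD_cons]
        rw [show (rest.foldl bStep [c + (|a.1 - b.1| + |a.2 - b.2|)]).getLastD c
              = (rest.foldl bStep [c + (|a.1 - b.1| + |a.2 - b.2|)]).getLastD 0 from by
          simp [List.getLastD_eq_getLast?]
          cases hl : (rest.foldl bStep [c + (|a.1 - b.1| + |a.2 - b.2|)]).getLast? with
          | some x => simp
          | none => exact absurd (List.getLast?_eq_none_iff.mp hl) hne]
        rw [this]; ring

-- ===== VERDICT (by name: the statement is the Claim_ definition above) =====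
theorem calculate_wire_distance_spec : Claim_equal_calculate_wire_distance := by
  intro p wire _
  show calculate_wire_distance p wire = calculate_wire_distance_alt p wire
  rw [calculate_wire_distance, calculate_wire_distance_alt, aLoop_eq, bFind_eq]
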